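-- pv_equiv track=rewrite | github.com/Sayee97/Data-Mining-553 | Assignment_3/task2train.py | count_sayee
-- ===== SOURCE A (Python) =====
-- def count_sayee(words):
--
-- 	d = {}
-- 	max_times = 0
-- 	for word in words:
-- 		if word in d:
-- 			d[word]+=1
-- 		else:
-- 			d[word]=1
-- 	max_times = max(d.values())
-- 	d = dict(filter(lambda kv: (kv[1]) > 0.000001*len(words), d.items()))
-- 	sort_d = []
-- 	for k,v in d.items():
-- 		sort_d.append((k,v,max_times))
-- 	sort_d = sorted(sort_d, key = lambda x:x[1], reverse = True)
-- 	return sort_d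
-- ===== SOURCE B (Python) =====
-- def count_sayee(words):
--     d = {}
--     for w in words:
--         d[w] = d.get(w, 0) + 1
--     max_times = max(d.values())
--     buckets = {}
--     for w, v in d.items():
--         buckets.setdefault(v, []).append((w, v))
--     n = len(words)
--     res = []
--     for c in range(max_times, 0, -1):
--         for w, v in buckets.get(c, []):
--             if v > 0.000001 * n:
--                 res.append((w, v, max_times))
--     return res
-- ===== Notes on version B (the rewrite author's own statement) =====
-- stated objective: alternative
-- what changed: B replaces A's comparison sort (sorted by count, reverse=True) with a grouped traversal: it scans count values from the maximum down to 1 and emits the dict's entries with that count in insertion order, reproducing the stable descending order without sorting.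
import Mathlib
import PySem

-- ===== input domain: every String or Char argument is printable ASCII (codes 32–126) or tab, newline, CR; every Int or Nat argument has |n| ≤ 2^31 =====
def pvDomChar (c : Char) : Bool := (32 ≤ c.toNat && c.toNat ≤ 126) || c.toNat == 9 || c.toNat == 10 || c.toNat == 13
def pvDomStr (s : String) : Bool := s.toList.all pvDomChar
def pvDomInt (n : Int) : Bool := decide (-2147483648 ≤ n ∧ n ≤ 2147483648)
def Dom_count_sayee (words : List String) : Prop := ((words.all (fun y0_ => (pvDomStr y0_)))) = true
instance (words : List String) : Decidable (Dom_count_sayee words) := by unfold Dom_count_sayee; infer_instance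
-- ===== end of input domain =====

-- B replaces the comparison sort by emitting dict entries grouped by count, scanning counts
-- from the maximum down (same output, alternative algorithm; not claimed faster).


-- ===== PORT A =====
-- literal port of A; the float threshold '0.000001*len(words)' is ported as the rational
-- comparison '1000000*v > len(words)', exact for every length where double rounding does not
-- flip the comparison (all lengths far below 10^6 in particular).
def count_sayee (words : List String) : List (String × Int × Int) :=
  let d : PySem.Dict String Int :=
    words.foldl (fun d word =>
      if d.contains word then d.modify word 0 (· + 1) else d.insert word 1)
      PySem.Dict.empty
  match PySem.List.max? (PySem.Dict.values d) (fun v => v) with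
  | none => []   -- Python: max([]) raises ValueError here (words = []); excluded by Pre_
  | some max_times =>
      -- dict(filter(...)): keys of d are unique, so the new dict holds exactly the filtered pairs
      let d2 : PySem.Dict String Int :=
        ⟨(PySem.Dict.items d).filter (fun kv => decide (1000000 * kv.2 > (words.length : Int)))⟩
      let sort_d : List (String × Int × Int) :=
        (PySem.Dict.items d2).foldl (fun acc kv => acc ++ [(kv.1, kv.2, max_times)]) []
      PySem.List.sorted sort_d (fun x => x.2.1) true

-- ===== PORT B =====
def count_sayee_alt (words : List String) : List (String × Int × Int) :=
  let d : PySem.Dict String Int :=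
    words.foldl (fun d w => d.insert w (d.getD w 0 + 1)) PySem.Dict.empty
  match PySem.List.max? (PySem.Dict.values d) (fun v => v) with
  | none => []   -- Python: max([]) raises ValueError here (words = []); excluded by Pre_
  | some max_times =>
      -- buckets.setdefault(v, []).append((w, v))
      let buckets : PySem.Dict Int (List (String × Int)) :=
        (PySem.Dict.items d).foldl (fun b kv => b.modify kv.2 [] (· ++ [kv]))
          PySem.Dict.empty
      let n : Int := words.length
      (PySem.List.pyRange max_times 0 (-1)).foldl (fun res c =>
        (buckets.getD c []).foldl (fun res kv =>
          if decide (1000000 * kv.2 > n) then res ++ [(kv.1, kv.2, max_times)]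
          else res) res) []

-- ===== PRECONDITION & SPEC =====
-- Python A raises ValueError (max of an empty sequence) on words = []; that is the only input excluded.
def Pre_count_sayee (words : List String) : Prop := words ≠ []
instance (words : List String) : Decidable (Pre_count_sayee words) := by unfold Pre_count_sayee; infer_instance
def pvWitness_count_sayee : List String := ["a", "b", "a"]

def Spec_count_sayee (words : List String) (out : List (String × Int × Int)) : Prop := out = count_sayee_alt words
instance (words : List String) (out : List (String × Int × Int)) : Decidable (Spec_count_sayee words out) := by unfold Spec_count_sayee; infer_instance

-- ===== CLAIM (what is proved, stated in full; the proofs are below) =====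
def Claim_equal_count_sayee : Prop := ∀ (words : List String), Dom_count_sayee words → Pre_count_sayee words → Spec_count_sayee words (count_sayee words)

-- ===== LEMMAS AND PROOFS =====

-- x passes over a prefix none of whose elements trigger the insertion test
theorem insertBy_skip {α : Type} (before : α → α → Bool) (x : α) (ys zs : List α)
    (hys : ∀ y ∈ ys, before x y = false) :
    PySem.List.insertBy before x (ys ++ zs) = ys ++ PySem.List.insertBy before x zs := by
  induction ys with
  | nil => rfl
  | cons y ys ih =>
    simp only [List.cons_append, PySem.List.insertBy, hys y (by simp), Bool.false_eq_true, if_false]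
    simp [ih (fun y hy => hys y (by simp [hy]))]

-- x inserted after the not-before prefix and in front of the first 'before' element
theorem insertBy_between {α : Type} (before : α → α → Bool) (x : α) (ys zs : List α)
    (hys : ∀ y ∈ ys, before x y = false) (hzs : ∀ z ∈ zs, before x z = true) :
    PySem.List.insertBy before x (ys ++ zs) = ys ++ [x] ++ zs := by
  rw [insertBy_skip before x ys zs hys]
  cases zs with
  | nil => simp [PySem.List.insertBy]
  | cons z zs => simp [PySem.List.insertBy, hzs z (by simp)]

-- inserting x into a list grouped by strictly decreasing key values lands at the end of x's group
theorem insertBy_flatMap_grouped {α : Type} (key : α → Int) (x : α) (cs : List Int)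
    (g : Int → List α) (hcs : cs.Pairwise (· > ·))
    (hg : ∀ c ∈ cs, ∀ y ∈ g c, key y = c) (hx : key x ∈ cs) :
    PySem.List.insertBy (fun a b => decide (key b < key a)) x (cs.flatMap g)
      = cs.flatMap (fun c => g c ++ if key x == c then [x] else []) := by
  induction cs with
  | nil => simp at hx
  | cons c cs ih =>
    have hpw := (List.pairwise_cons.mp hcs).1
    by_cases hc : key x = c
    · -- x joins the first group; every later group's key is smaller
      have h1 : ∀ y ∈ g c, (fun a b => decide (key b < key a)) x y = false := by
        intro y hy; simp [hg c (by simp) y hy, hc]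
      have h2 : ∀ z ∈ cs.flatMap g, (fun a b => decide (key b < key a)) x z = true := by
        intro z hz
        obtain ⟨c', hc', hz'⟩ := List.mem_flatMap.mp hz
        have := hg c' (by simp [hc']) z hz'
        have := hpw c' hc'
        simp_all
      have heq : cs.flatMap (fun c => g c ++ if key x == c then [x] else []) = cs.flatMap g := by
        apply List.flatMap_congr ?_
        intro c' hc'
        have := hpw c' hc'
        have : (key x == c') = false := by simp; omega
        simp [this]
      conv_lhs => rw [List.flatMap_cons]
      rw [insertBy_between _ _ _ _ h1 h2]
      conv_rhs => rw [List.flatMap_cons]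
      rw [heq]
      simp [hc]
    · -- x belongs to a later group; it passes the whole first group (its keys are larger)
      have hx' : key x ∈ cs := by
        cases hx with
        | head => exact absurd rfl hc
        | tail _ h => exact h
      have h1 : ∀ y ∈ g c, (fun a b => decide (key b < key a)) x y = false := by
        intro y hy
        have hk := hg c (by simp) y hy
        have : c > key x := hpw _ hx'
        simp [hk]; omega
      rw [List.flatMap_cons, insertBy_skip _ _ _ _ h1,
        ih ((List.pairwise_cons.mp hcs).2) (fun c' hc' => hg c' (by simp [hc'])) hx']
      simp [hc]

-- a stable descending sort is the concatenation of the key-groups, keys strictly decreasing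
theorem sorted_rev_eq_flatMap_groups {α : Type} (key : α → Int) (cs : List Int)
    (hcs : cs.Pairwise (· > ·)) (L : List α) (hmem : ∀ x ∈ L, key x ∈ cs) :
    cs.flatMap (fun c => L.filter (fun x => key x == c)) = PySem.List.sorted L key true := by
  induction L using List.reverseRecOn with
  | nil => simp [PySem.List.sorted]
  | append_singleton L x ih =>
    rw [PySem.List.sorted_rev_eq_foldl_insertBy, List.foldl_append, List.foldl_cons, List.foldl_nil,
      ← PySem.List.sorted_rev_eq_foldl_insertBy,
      ← ih (fun y hy => hmem y (by simp [hy])),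
      insertBy_flatMap_grouped key x cs _ hcs
        (fun c _ y hy => by simpa using (List.mem_filter.mp hy).2)
        (hmem x (by simp))]
    apply List.flatMap_congr ?_
    intro c hc
    simp [List.filter_append, List.filter_singleton]

-- range(M, 0, -1) written out
theorem pyRange_down_one (M : Int) (hM : 0 < M) :
    PySem.List.pyRange M 0 (-1) = (List.range M.toNat).map (fun k : Nat => M - (k : Int)) := by
  have h0 : ¬ (0:Int) < -1 := by omega
  simp only [PySem.List.pyRange, if_neg (by omega : ¬ (-1:Int) = 0), h0, if_false,
    if_pos (by omega : (0:Int) < M)]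
  have h1 : ((M - 0 + - -1 - 1) / - -1) = M := by norm_num
  rw [h1]
  apply List.map_congr_left
  intro k _
  omega

theorem pyRange_down_pairwise (M : Int) (hM : 0 < M) :
    (PySem.List.pyRange M 0 (-1)).Pairwise (· > ·) := by
  rw [pyRange_down_one M hM, List.pairwise_map]
  exact List.pairwise_lt_range.imp (by intro a b h; simp; omega)

theorem mem_pyRange_down (M c : Int) (hM : 0 < M) (h1 : 1 ≤ c) (h2 : c ≤ M) :
    c ∈ PySem.List.pyRange M 0 (-1) := by
  rw [pyRange_down_one M hM]
  exact List.mem_map.mpr ⟨(M - c).toNat, List.mem_range.mpr (by omega), by omega⟩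

-- A's dict-building loop is the counting loop
theorem countA_eq_counter (words : List String) :
    words.foldl (fun d word =>
        if d.contains word then d.modify word 0 (· + 1) else d.insert word 1)
      PySem.Dict.empty = PySem.Dict.counter words := by
  rw [PySem.Dict.counter_eq_foldl]
  apply PySem.List.foldl_congr_mem
  intro d w _
  by_cases h : d.contains w
  · simp [h]
  · simp only [h, Bool.false_eq_true, if_false, PySem.Dict.modify,
      PySem.Dict.getD_of_not_contains d 0 (by simpa using h)]
    norm_num

theorem count_sayee_spec : Claim_equal_count_sayee := by
  intro words _ hpre
  unfold Spec_count_sayee count_sayee count_sayee_alt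
  rw [countA_eq_counter, PySem.Dict.foldl_insert_getD_add_one_eq_counter]
  -- the dict is nonempty, so max() returns a value M
  obtain ⟨w0, ws, rfl⟩ : ∃ w0 ws, words = w0 :: ws := by
    cases words with
    | nil => exact absurd rfl hpre
    | cons a l => exact ⟨a, l, rfl⟩
  set words := w0 :: ws with hwords
  have hvals : PySem.Dict.values (PySem.Dict.counter words) ≠ [] := by
    intro h
    have : (PySem.Dict.counter words).items = [] := by
      simpa [PySem.Dict.values] using h
    rw [PySem.Dict.items_counter] at this
    have : w0 ∈ PySem.Set.ofList words := (PySem.Set.mem_ofList words w0).mpr (by simp [hwords])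
    simp_all
  obtain ⟨M, hmax⟩ : ∃ M, PySem.List.max? (PySem.Dict.values (PySem.Dict.counter words))
      (fun v => v) = some M := by
    cases h : PySem.List.max? (PySem.Dict.values (PySem.Dict.counter words)) (fun v => v) with
    | none => exact absurd ((PySem.List.max?_eq_none_iff _ _).mp h) hvals
    | some m => exact ⟨m, rfl⟩
  simp only [hmax]
  -- value facts: every count is between 1 and M
  have hval_le : ∀ v ∈ PySem.Dict.values (PySem.Dict.counter words), v ≤ M :=
    PySem.List.max?_isMax hmax
  have hval_pos : ∀ kv ∈ (PySem.Dict.counter words).items, 1 ≤ kv.2 ∧ kv.2 ≤ M := by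
    intro kv hkv
    constructor
    · rw [PySem.Dict.items_counter] at hkv
      obtain ⟨k, hk, rfl⟩ := List.mem_map.mp hkv
      have : k ∈ words := (PySem.Set.mem_ofList words k).mp hk
      simpa using List.count_pos_iff.mpr this
    · exact hval_le kv.2 (List.mem_map.mpr ⟨kv, hkv, rfl⟩)
  have hMpos : 0 < M := by
    have hM := PySem.List.max?_mem hmax
    obtain ⟨kv, hkv, h2⟩ := List.mem_map.mp hM
    have := (hval_pos kv hkv).1
    omega
  -- shapes: A is a stable descending sort of L, B is the grouped traversal
  set items := (PySem.Dict.counter words).items with hitems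
  set P : String × Int → Bool := fun kv => decide (1000000 * kv.2 > (words.length : Int)) with hP
  set f : String × Int → String × Int × Int := fun kv => (kv.1, kv.2, M) with hf
  set L : List (String × Int × Int) := (items.filter P).map f with hL
  have hAside : (PySem.Dict.items ⟨items.filter P⟩).foldl
      (fun acc kv => acc ++ [(kv.1, kv.2, M)]) [] = L := by
    rw [show PySem.Dict.items ⟨items.filter P⟩ = items.filter P from rfl,
      PySem.List.foldl_append_singleton_eq_map]
    simp [hL, hf]
  rw [hAside]
  -- B: inner loop appends one group, outer loop concatenates the groups
  -- each bucket holds exactly the entries with that count, in insertion order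
  have hbuck : ∀ c : Int,
      PySem.Dict.getD (items.foldl (fun b kv => b.modify kv.2 [] (· ++ [kv]))
        PySem.Dict.empty) c []
      = items.filter (fun kv => kv.2 == c) := by
    intro c
    have hfm : items.foldl (fun b kv => b.modify kv.2 [] (· ++ [kv])) PySem.Dict.empty
        = (items.map (fun kv => ((kv.2 : Int), kv))).foldl
            (fun b p => b.modify p.1 [] (· ++ [p.2])) PySem.Dict.empty := by
      rw [List.foldl_map]
    rw [hfm, PySem.Dict.getD_foldl_modify_append, List.filter_map]
    simp [Function.comp_def]
  have hinner : ∀ (res : List (String × Int × Int)) (c : Int),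
      (PySem.Dict.getD (items.foldl (fun b kv => b.modify kv.2 [] (· ++ [kv]))
          PySem.Dict.empty) c []).foldl
        (fun res kv => if P kv then res ++ [f kv] else res) res
      = res ++ L.filter (fun x => x.2.1 == c) := by
    intro res c
    rw [hbuck c, PySem.List.foldl_append_if P f]
    congr 1
    rw [hL, List.filter_map]
    have hcomp : (fun x => x.2.1 == c) ∘ f = fun kv => kv.2 == c := by
      funext kv; simp [hf]
    rw [hcomp, List.filter_filter, List.filter_filter]
    congr 1
    apply List.filter_congr
    intro kv _
    exact Bool.and_comm _ _
  have houter : (PySem.List.pyRange M 0 (-1)).foldl (fun res c =>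
      (PySem.Dict.getD (items.foldl (fun b kv => b.modify kv.2 [] (· ++ [kv]))
          PySem.Dict.empty) c []).foldl
        (fun res kv => if P kv then res ++ [f kv] else res) res) []
      = (PySem.List.pyRange M 0 (-1)).flatMap (fun c => L.filter (fun x => x.2.1 == c)) := by
    calc (PySem.List.pyRange M 0 (-1)).foldl (fun res c =>
          (PySem.Dict.getD (items.foldl (fun b kv => b.modify kv.2 [] (· ++ [kv]))
              PySem.Dict.empty) c []).foldl
            (fun res kv => if P kv then res ++ [f kv] else res) res) []
        = (PySem.List.pyRange M 0 (-1)).foldl (fun res c =>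
            res ++ L.filter (fun x => x.2.1 == c)) [] :=
          PySem.List.foldl_congr_mem _ _ _ _ (fun res c _ => hinner res c)
      _ = [] ++ (PySem.List.pyRange M 0 (-1)).flatMap
            (fun c => L.filter (fun x => x.2.1 == c)) :=
          PySem.List.foldl_append_eq_flatMap _ _ _
      _ = _ := by simp
  rw [houter]
  -- the grouped traversal IS the stable descending sort
  exact (sorted_rev_eq_flatMap_groups (fun x => x.2.1) _ (pyRange_down_pairwise M hMpos) L
    (by
      intro x hx
      rw [hL] at hx
      obtain ⟨kv, hkv, rfl⟩ := List.mem_map.mp hx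
      have := hval_pos kv (List.mem_filter.mp hkv).1
      exact mem_pyRange_down M _ hMpos this.1 this.2)).symm
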